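-- pv_equiv track=rewrite | github.com/tomulanovski/gene2net | scripts/create_taxa_table.py | extract_species_info
-- ===== SOURCE A (Python) =====
-- def extract_species_info(taxa_name, species_field=0, known_species=None):
--     """
--     Extract species name from taxa name.
--
--     If known_species is provided (list of known species names), uses longest-prefix
--     matching to handle tricky cases like 'saxatilis' vs 'saxatilis_var_mairei'.
--
--     Otherwise falls back to underscore-separated field extraction.
--
--     Args:
--         taxa_name: Full taxon name (e.g., "Ephedra_sinica_KT033298")
--         species_field: Which underscore-separated field to use as species name (default: 0)
--         known_species: Optional list of known species names for prefix matching
--     """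
--     # If we have known species, try longest-prefix match
--     if known_species:
--         for species in sorted(known_species, key=len, reverse=True):
--             if taxa_name.startswith(species + '_') or taxa_name == species:
--                 return species
--
--     parts = taxa_name.split('_')
--     if species_field < len(parts):
--         return parts[species_field]
--     return parts[0]
-- ===== SOURCE B (Python) =====
-- def extract_species_info(taxa_name, species_field=0, known_species=None):
--     # Single linear scan keeping the longest matching known species (no sort).
--     if known_species:
--         best = None
--         for species in known_species:
--             if (taxa_name == species or taxa_name.startswith(species + '_')) \
--                and (best is None or len(species) > len(best)):
--                 best = species
--         if best is not None:
--             return best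
--
--     parts = taxa_name.split('_')
--     if species_field < len(parts):
--         return parts[species_field]
--     return parts[0]
-- ===== Notes on version B (the rewrite author's own statement) =====
-- stated objective: alternative
-- what changed: The known-species branch no longer sorts the list by length and returns the first match; it does one linear scan keeping the longest matching species (ties impossible: equal-length matches are equal strings); the underscore-split fallback is unchanged.
import Mathlib
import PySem

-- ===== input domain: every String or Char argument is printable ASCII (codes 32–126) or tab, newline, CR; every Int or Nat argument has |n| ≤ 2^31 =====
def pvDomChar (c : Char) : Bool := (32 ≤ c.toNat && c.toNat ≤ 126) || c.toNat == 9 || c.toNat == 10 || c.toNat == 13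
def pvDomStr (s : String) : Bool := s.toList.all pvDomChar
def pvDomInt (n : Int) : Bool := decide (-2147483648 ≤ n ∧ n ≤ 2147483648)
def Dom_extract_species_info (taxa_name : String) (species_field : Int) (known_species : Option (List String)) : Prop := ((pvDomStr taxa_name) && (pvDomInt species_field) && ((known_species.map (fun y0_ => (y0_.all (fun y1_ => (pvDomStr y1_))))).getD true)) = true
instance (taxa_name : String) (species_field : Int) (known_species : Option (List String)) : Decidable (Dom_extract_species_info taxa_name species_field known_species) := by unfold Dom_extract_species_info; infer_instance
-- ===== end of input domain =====

-- B replaces A's sort-by-length-then-first-match with one linear scan keeping the longest match (alternative decomposition; fallback unchanged).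

-- ===== PORT A =====
-- A's loop over sorted(known_species, key=len, reverse=True), returning the first match.
def esiFirstA (taxa : String) : List String → Option String
  | [] => none
  | s :: rest =>
    if PySem.Chars.startswith taxa.toList (s.toList ++ ['_']) || taxa.toList == s.toList
    then some s else esiFirstA taxa rest

def extract_species_info (taxa_name : String) (species_field : Int) (known_species : Option (List String)) : String :=
  let ksl := known_species.getD []
  let firstRes : Option String :=
    if ksl.isEmpty then none
    else esiFirstA taxa_name (PySem.List.sorted ksl (fun s => s.toList.length) true)
  match firstRes with
  | some s => s
  | none =>
    let parts := PySem.Chars.splitOn taxa_name.toList ['_']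
    if species_field < (parts.length : Int) then
      String.ofList ((PySem.List.pyGet? parts species_field).getD [])   -- none only outside Pre_
    else String.ofList (parts.headD [])

-- ===== PORT B =====
def extract_species_info_alt (taxa_name : String) (species_field : Int) (known_species : Option (List String)) : String :=
  let ksl := known_species.getD []
  let best : Option String :=
    if ksl.isEmpty then none
    else ksl.foldl (fun b s =>
      if (taxa_name.toList == s.toList || PySem.Chars.startswith taxa_name.toList (s.toList ++ ['_'])) &&
         (match b with
          | none => true
          | some bb => decide (bb.toList.length < s.toList.length))
      then some s else b) none
  match best with
  | some s => s
  | none =>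
    let parts := PySem.Chars.splitOn taxa_name.toList ['_']
    if species_field < (parts.length : Int) then
      String.ofList ((PySem.List.pyGet? parts species_field).getD [])   -- none only outside Pre_
    else String.ofList (parts.headD [])

-- ===== PRECONDITION & SPEC =====
-- Pre_ excludes exactly the inputs where Python A raises IndexError: no known-species match and a
-- negative species_field below -len(parts).  (B raises there too.)
def Pre_extract_species_info (taxa_name : String) (species_field : Int) (known_species : Option (List String)) : Prop :=
  (∃ s ∈ known_species.getD [], taxa_name.toList = s.toList ∨ (s.toList ++ ['_']) <+: taxa_name.toList)
  ∨ -(((PySem.Chars.splitOn taxa_name.toList ['_']).length : Int)) ≤ species_field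
instance (taxa_name : String) (species_field : Int) (known_species : Option (List String)) : Decidable (Pre_extract_species_info taxa_name species_field known_species) := by unfold Pre_extract_species_info; infer_instance

def pvWitness_extract_species_info : String × Int × Option (List String) :=
  ("Ephedra_sinica_KT033298", 0, some ["saxatilis", "Ephedra_sinica"])

def Spec_extract_species_info (taxa_name : String) (species_field : Int) (known_species : Option (List String)) (out : String) : Prop := out = extract_species_info_alt taxa_name species_field known_species
instance (taxa_name : String) (species_field : Int) (known_species : Option (List String)) (out : String) : Decidable (Spec_extract_species_info taxa_name species_field known_species out) := by unfold Spec_extract_species_info; infer_instance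

-- ===== CLAIM (what is proved, stated in full; the proofs are below) =====
def Claim_equal_extract_species_info : Prop := ∀ (taxa_name : String) (species_field : Int) (known_species : Option (List String)), Dom_extract_species_info taxa_name species_field known_species → Pre_extract_species_info taxa_name species_field known_species → Spec_extract_species_info taxa_name species_field known_species (extract_species_info taxa_name species_field known_species)

-- ===== LEMMAS AND PROOFS =====

-- the shared match test, as a Bool
def esiM (taxa s : String) : Bool :=
  PySem.Chars.startswith taxa.toList (s.toList ++ ['_']) || taxa.toList == s.toList

lemma esiM_prefix {taxa s : String} (h : esiM taxa s = true) : s.toList <+: taxa.toList := by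
  unfold esiM at h
  rcases Bool.or_eq_true_iff.mp h with h | h
  · exact ((s.toList.prefix_append ['_']).trans ((PySem.Chars.startswith_iff _ _).mp h))
  · exact (eq_of_beq h).symm ▸ List.prefix_refl _

-- two matches of the same length are the same string
lemma esiM_uniq {taxa s t : String} (hs : esiM taxa s = true) (ht : esiM taxa t = true)
    (hlen : s.toList.length = t.toList.length) : s = t := by
  have hps := esiM_prefix hs
  have hpt := esiM_prefix ht
  have hpre : s.toList <+: t.toList :=
    List.prefix_of_prefix_length_le hps hpt (le_of_eq hlen)
  exact String.toList_inj.mp (hpre.eq_of_length hlen)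

-- A's loop: none ↔ no element matches
lemma esiFirstA_none {taxa : String} {l : List String} :
    esiFirstA taxa l = none ↔ ∀ t ∈ l, esiM taxa t = false := by
  induction l with
  | nil => simp [esiFirstA]
  | cons s rest ih =>
    unfold esiFirstA
    have hcond : (PySem.Chars.startswith taxa.toList (s.toList ++ ['_']) || taxa.toList == s.toList) = esiM taxa s := rfl
    rw [hcond]
    cases h : esiM taxa s <;> simp [h, ih]

-- A's loop on a length-nonincreasing list returns a matching element of maximal length
lemma esiFirstA_some {taxa : String} {l : List String} {m : String}
    (hp : l.Pairwise (fun a b => b.toList.length ≤ a.toList.length))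
    (h : esiFirstA taxa l = some m) :
    m ∈ l ∧ esiM taxa m = true ∧
      ∀ t ∈ l, esiM taxa t = true → t.toList.length ≤ m.toList.length := by
  induction l with
  | nil => simp [esiFirstA] at h
  | cons s rest ih =>
    rw [List.pairwise_cons] at hp
    unfold esiFirstA at h
    have hcond : (PySem.Chars.startswith taxa.toList (s.toList ++ ['_']) || taxa.toList == s.toList) = esiM taxa s := rfl
    rw [hcond] at h
    cases hm : esiM taxa s with
    | true =>
      rw [hm, if_pos rfl] at h
      cases Option.some.inj h
      refine ⟨List.mem_cons_self, hm, ?_⟩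
      intro t ht _
      rcases List.mem_cons.mp ht with rfl | ht
      · exact le_refl _
      · exact hp.1 t ht
    | false =>
      rw [hm] at h
      simp only [Bool.false_eq_true, if_false] at h
      obtain ⟨hmem, hM, hmax⟩ := ih hp.2 h
      refine ⟨List.mem_cons_of_mem _ hmem, hM, ?_⟩
      intro t ht hMt
      rcases List.mem_cons.mp ht with rfl | ht
      · rw [hMt] at hm; exact absurd hm (by simp)
      · exact hmax t ht hMt

-- B's fold step, and its test written through esiM
def esiStep (taxa : String) (b : Option String) (s : String) : Option String :=
  if (taxa.toList == s.toList || PySem.Chars.startswith taxa.toList (s.toList ++ ['_'])) &&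
     (match b with
      | none => true
      | some bb => decide (bb.toList.length < s.toList.length))
  then some s else b

def esiKeep (b : Option String) (s : String) : Bool :=
  match b with
  | none => true
  | some bb => decide (bb.toList.length < s.toList.length)

lemma esiStep_test (taxa s : String) (b : Option String) :
    esiStep taxa b s = if (esiM taxa s && esiKeep b s) = true then some s else b := by
  unfold esiStep esiM esiKeep
  rw [Bool.or_comm]

-- if nothing matches, B's fold keeps the accumulator
lemma esiFold_of_no_match {taxa : String} {l : List String} (b : Option String)
    (hall : ∀ t ∈ l, esiM taxa t = false) :
    l.foldl (esiStep taxa) b = b := by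
  induction l generalizing b with
  | nil => rfl
  | cons s rest ih =>
    have hs := hall s (by simp)
    rw [List.foldl_cons, esiStep_test, hs]
    simp only [Bool.false_and, Bool.false_eq_true, if_false]
    exact ih b (fun t ht => hall t (List.mem_cons_of_mem _ ht))

-- if some element matches, B's fold does not return none
lemma esiFold_ne_none {taxa : String} :
    ∀ (l : List String) (b : Option String),
      ((∃ t ∈ l, esiM taxa t = true) ∨ (∃ x, b = some x)) →
      l.foldl (esiStep taxa) b ≠ none := by
  intro l
  induction l with
  | nil =>
    intro b hb
    rcases hb with ⟨t, ht, _⟩ | ⟨x, hx⟩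
    · simp at ht
    · simp [hx]
  | cons s rest ih =>
    intro b hb
    rw [List.foldl_cons, esiStep_test]
    cases hc : (esiM taxa s && esiKeep b s) with
    | true =>
      rw [if_pos rfl]
      exact ih _ (Or.inr ⟨s, rfl⟩)
    | false =>
      simp only [Bool.false_eq_true, if_false]
      rcases hb with ⟨t', ht', hMt'⟩ | ⟨x, hx⟩
      · rcases List.mem_cons.mp ht' with rfl | ht'
        · -- t' matches but the test failed: the accumulator must be some
          rcases hb' : b with _ | bb
          · rw [hb', hMt'] at hc; simp [esiKeep] at hc
          · exact ih (some bb) (Or.inr ⟨bb, rfl⟩)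
        · exact ih b (Or.inl ⟨t', ht', hMt'⟩)
      · exact ih b (Or.inr ⟨x, hx⟩)

-- B's fold: characterization of a some result
lemma esiFold_some {taxa : String} {l : List String} :
    ∀ (b : Option String) (m : String), l.foldl (esiStep taxa) b = some m →
      (b = some m ∨ (esiM taxa m = true ∧ m ∈ l)) ∧
      (∀ b0, b = some b0 → b0.toList.length ≤ m.toList.length) ∧
      (∀ t ∈ l, esiM taxa t = true → t.toList.length ≤ m.toList.length) := by
  induction l with
  | nil =>
    intro b m h
    simp only [List.foldl_nil] at h
    subst h
    exact ⟨Or.inl rfl, fun b0 hb => by cases hb; exact le_refl _, by simp⟩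
  | cons s rest ih =>
    intro b m h
    rw [List.foldl_cons, esiStep_test] at h
    cases hc : (esiM taxa s && esiKeep b s) with
    | true =>
      rw [hc, if_pos rfl] at h
      obtain ⟨hMs, hKs⟩ := Bool.and_eq_true_iff.mp hc
      obtain ⟨h1, h2, h3⟩ := ih (some s) m h
      have hsm : s.toList.length ≤ m.toList.length := h2 s rfl
      refine ⟨?_, ?_, ?_⟩
      · rcases h1 with h1 | h1
        · cases Option.some.inj h1
          exact Or.inr ⟨hMs, List.mem_cons_self⟩
        · exact Or.inr ⟨h1.1, List.mem_cons_of_mem _ h1.2⟩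
      · intro b0 hb
        subst hb
        have hlt : b0.toList.length < s.toList.length := by
          simpa [esiKeep] using hKs
        exact le_trans (le_of_lt hlt) hsm
      · intro t ht hMt
        rcases List.mem_cons.mp ht with rfl | ht
        · exact hsm
        · exact h3 t ht hMt
    | false =>
      rw [hc] at h
      simp only [Bool.false_eq_true, if_false] at h
      obtain ⟨h1, h2, h3⟩ := ih b m h
      refine ⟨?_, h2, ?_⟩
      · rcases h1 with h1 | h1
        · exact Or.inl h1
        · exact Or.inr ⟨h1.1, List.mem_cons_of_mem _ h1.2⟩
      · intro t ht hMt
        rcases List.mem_cons.mp ht with rfl | ht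
        · -- t matched, yet the step test failed: b = some bb with len t ≤ len bb ≤ len m
          rcases hb' : b with _ | bb
          · rw [hb', hMt] at hc; simp [esiKeep] at hc
          · have hle : ¬ bb.toList.length < t.toList.length := by
              intro hlt
              have hkt : esiKeep (some bb) t = true := decide_eq_true hlt
              rw [hb', hMt, hkt] at hc
              simp at hc
            exact le_trans (not_lt.mp hle) (h2 bb hb')
        · exact h3 t ht hMt

-- the two branch results agree
lemma branch_eq (taxa : String) (ksl : List String) :
    esiFirstA taxa (PySem.List.sorted ksl (fun s => s.toList.length) true) =
      ksl.foldl (esiStep taxa) none := by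
  rcases hA : esiFirstA taxa (PySem.List.sorted ksl (fun s => s.toList.length) true) with _ | mA
  · -- no match anywhere
    have hall : ∀ t ∈ ksl, esiM taxa t = false := by
      intro t ht
      exact (esiFirstA_none.mp hA) t ((PySem.List.mem_sorted ksl _ true t).mpr ht)
    exact (esiFold_of_no_match none hall).symm
  · obtain ⟨hmemA, hMA, hmaxA⟩ :=
      esiFirstA_some (PySem.List.sorted_pairwise_rev ksl (fun s => s.toList.length)) hA
    have hmemA' : mA ∈ ksl := (PySem.List.mem_sorted ksl _ true mA).mp hmemA
    rcases hB : ksl.foldl (esiStep taxa) none with _ | mB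
    · exact absurd hB (esiFold_ne_none ksl none (Or.inl ⟨mA, hmemA', hMA⟩))
    · obtain ⟨h1, _, hmaxB⟩ := esiFold_some none mB hB
      have h1' : esiM taxa mB = true ∧ mB ∈ ksl := by
        rcases h1 with h1 | h1
        · exact absurd h1 (by simp)
        · exact h1
      have hlen : mA.toList.length = mB.toList.length := by
        have ha := hmaxB mA hmemA' hMA
        have hb := hmaxA mB ((PySem.List.mem_sorted ksl _ true mB).mpr h1'.2) h1'.1
        omega
      rw [esiM_uniq hMA h1'.1 hlen]

-- the whole known-species branch, A's form rewritten to B's form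
lemma branch_if_eq (taxa : String) (ksl : List String) :
    (if ksl.isEmpty then none
     else esiFirstA taxa (PySem.List.sorted ksl (fun s => s.toList.length) true)) =
    (if ksl.isEmpty then none
     else ksl.foldl (fun b s =>
       if (taxa.toList == s.toList || PySem.Chars.startswith taxa.toList (s.toList ++ ['_'])) &&
          (match b with
           | none => true
           | some bb => decide (bb.toList.length < s.toList.length))
       then some s else b) none) := by
  by_cases h : ksl.isEmpty
  · rw [if_pos h, if_pos h]
  · rw [if_neg h, if_neg h]
    exact branch_eq taxa ksl

-- ===== VERDICT (by name: the statement is the Claim_ definition above) =====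
theorem extract_species_info_spec : Claim_equal_extract_species_info := by
  intro taxa_name species_field known_species _ _
  unfold Spec_extract_species_info extract_species_info extract_species_info_alt
  simp only [branch_if_eq]
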